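-- pv_equiv track=rewrite | github.com/PLSE-Lab/Python-MLAPI-expl | python_sources/fast-n-e-z.py | which_name_first
-- ===== SOURCE A (Python) =====
-- def which_name_first(sentence, name1, name2):
--     name1_check = 0
--     for word_punct in sentence.split():
--         for word_comma in word_punct.split(";"):
--             for word in word_comma.split(","):
--                 if word == name2 and name1_check == 0:
--                     return name2
--                 if word == name1:
--                     name1_check = 1
--     return name1
-- ===== SOURCE B (Python) =====
-- def which_name_first(sentence, name1, name2):
--     # Flatten the identical nested splits into one token list, then compare
--     # the first-occurrence indices of the two names.
--     tokens = [word
--               for word_punct in sentence.split()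
--               for word_comma in word_punct.split(";")
--               for word in word_comma.split(",")]
--     try:
--         i1 = tokens.index(name1)
--     except ValueError:
--         i1 = len(tokens)
--     try:
--         i2 = tokens.index(name2)
--     except ValueError:
--         return name1
--     return name2 if i2 < i1 else name1
-- ===== Notes on version B (the rewrite author's own statement) =====
-- stated objective: alternative
-- what changed: Replaces A's single-pass flag-tracking scan with early return inside three nested split loops by building the flat token list once and comparing the first-occurrence indices of the two names (index of name1 defaulting to len(tokens), return name1 if name2 absent).
import Mathlib
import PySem

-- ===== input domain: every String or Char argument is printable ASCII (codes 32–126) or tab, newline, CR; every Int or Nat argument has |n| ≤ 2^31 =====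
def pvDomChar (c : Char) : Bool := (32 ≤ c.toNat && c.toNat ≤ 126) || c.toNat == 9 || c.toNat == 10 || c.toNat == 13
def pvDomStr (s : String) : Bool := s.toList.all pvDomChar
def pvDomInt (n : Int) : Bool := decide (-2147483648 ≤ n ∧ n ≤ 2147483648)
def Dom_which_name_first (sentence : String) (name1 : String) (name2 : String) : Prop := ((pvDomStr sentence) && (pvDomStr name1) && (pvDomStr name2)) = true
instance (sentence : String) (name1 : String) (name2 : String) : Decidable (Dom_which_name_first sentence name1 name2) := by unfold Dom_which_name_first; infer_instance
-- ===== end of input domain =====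

-- B flattens the identical nested splits into one token list and compares first-occurrence
-- indices of the two names, replacing A's flag-tracking nested scan (objective: alternative decomposition).


-- s.split(sep) for a nonempty separator, via PySem's exact char-level splitter
def pvSplit (s sep : String) : List String := (PySem.Chars.splitOn s.toList sep.toList).map String.ofList

-- ===== PORT A =====
-- innermost loop: for word in word_comma.split(","), with early return and name1_check state
def pvInnerA (name1 name2 : String) (words : List String) (check : Int) : Option String × Int :=
  match words with
  | [] => (none, check)
  | w :: ws =>
    if w == name2 && check == 0 then (some name2, check)
    else pvInnerA name1 name2 ws (if w == name1 then 1 else check)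

-- middle loop: for word_comma in word_punct.split(";")
def pvMidA (name1 name2 : String) (pieces : List String) (check : Int) : Option String × Int :=
  match pieces with
  | [] => (none, check)
  | p :: ps =>
    match pvInnerA name1 name2 (pvSplit p ",") check with
    | (some r, c) => (some r, c)
    | (none, c) => pvMidA name1 name2 ps c

-- outer loop: for word_punct in sentence.split()
def pvOuterA (name1 name2 : String) (wps : List String) (check : Int) : Option String × Int :=
  match wps with
  | [] => (none, check)
  | wp :: rest =>
    match pvMidA name1 name2 (pvSplit wp ";") check with
    | (some r, c) => (some r, c)
    | (none, c) => pvOuterA name1 name2 rest c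

def which_name_first (sentence : String) (name1 : String) (name2 : String) : String :=
  match pvOuterA name1 name2 (PySem.Str.split₀ sentence) 0 with
  | (some r, _) => r
  | (none, _) => name1

-- ===== PORT B =====
def which_name_first_alt (sentence : String) (name1 : String) (name2 : String) : String :=
  let tokens := (PySem.Str.split₀ sentence).flatMap (fun wp =>
    (pvSplit wp ";").flatMap (fun wc => pvSplit wc ","))
  let i1 := (PySem.List.index? tokens name1).getD tokens.length
  match PySem.List.index? tokens name2 with
  | none => name1
  | some i2 => if i2 < i1 then name2 else name1

-- ===== PRECONDITION & SPEC =====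
def Spec_which_name_first (sentence : String) (name1 : String) (name2 : String) (out : String) : Prop := out = which_name_first_alt sentence name1 name2
instance (sentence : String) (name1 : String) (name2 : String) (out : String) : Decidable (Spec_which_name_first sentence name1 name2 out) := by unfold Spec_which_name_first; infer_instance

-- ===== CLAIM (what is proved, stated in full; the proofs are below) =====
def Claim_equal_which_name_first : Prop := ∀ (sentence : String) (name1 : String) (name2 : String), Dom_which_name_first sentence name1 name2 → Spec_which_name_first sentence name1 name2 (which_name_first sentence name1 name2)

-- ===== LEMMAS AND PROOFS =====

-- A's early-return scan distributes over list append
theorem pvInnerA_append (name1 name2 : String) (xs ys : List String) (c : Int) :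
    pvInnerA name1 name2 (xs ++ ys) c =
      match pvInnerA name1 name2 xs c with
      | (some r, c') => (some r, c')
      | (none, c') => pvInnerA name1 name2 ys c' := by
  induction xs generalizing c with
  | nil => simp [pvInnerA]
  | cons x xs ih =>
    simp only [List.cons_append, pvInnerA]
    by_cases h : (x == name2 && c == 0) = true
    · simp [h]
    · simp [h, ih]

-- the middle loop equals the scan of the flattened "," splits
theorem pvMidA_flat (name1 name2 : String) (ps : List String) (c : Int) :
    pvMidA name1 name2 ps c =
      pvInnerA name1 name2 (ps.flatMap (fun p => pvSplit p ",")) c := by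
  induction ps generalizing c with
  | nil => simp [pvMidA, pvInnerA]
  | cons p ps ih =>
    simp only [pvMidA, List.flatMap_cons, pvInnerA_append]
    cases h : pvInnerA name1 name2 (pvSplit p ",") c with
    | mk r c' => cases r <;> simp [ih]

-- the outer loop equals the scan of the fully flattened token list
theorem pvOuterA_flat (name1 name2 : String) (wps : List String) (c : Int) :
    pvOuterA name1 name2 wps c =
      pvInnerA name1 name2
        (wps.flatMap (fun wp =>
          (pvSplit wp ";").flatMap (fun wc => pvSplit wc ","))) c := by
  induction wps generalizing c with
  | nil => simp [pvOuterA, pvInnerA]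
  | cons wp rest ih =>
    simp only [pvOuterA, List.flatMap_cons, pvInnerA_append, pvMidA_flat]
    cases h : pvInnerA name1 name2
        ((pvSplit wp ";").flatMap (fun wc => pvSplit wc ",")) c with
    | mk r c' => cases r <;> simp [ih]

-- once name1 has been seen, the scan never returns early
theorem pvInnerA_one (name1 name2 : String) (ts : List String) :
    pvInnerA name1 name2 ts 1 = (none, 1) := by
  induction ts with
  | nil => rfl
  | cons t ts ih =>
    simp only [pvInnerA]
    have : (t == name2 && (1 : Int) == 0) = false := by simp
    rw [this]
    simp only [Bool.false_eq_true, if_false]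
    by_cases h : t = name1 <;> simp [h, ih]

-- the value A extracts from the scan (started with check = 0) equals B's index comparison
theorem scan_eq_index (name1 name2 : String) (ts : List String) :
    (match pvInnerA name1 name2 ts 0 with
      | (some r, _) => r
      | (none, _) => name1) =
    (match PySem.List.index? ts name2 with
      | none => name1
      | some i2 =>
        if i2 < (PySem.List.index? ts name1).getD ts.length then name2 else name1) := by
  induction ts with
  | nil => simp [pvInnerA, PySem.List.index?_eq_idxOf?]
  | cons t ts ih =>
    by_cases h2 : t = name2
    · subst h2
      have hl : (match pvInnerA name1 t (t :: ts) 0 with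
          | (some r, _) => r | (none, _) => name1) = t := by
        simp [pvInnerA]
      rw [hl, PySem.List.index?_cons_self]
      by_cases h1 : t = name1
      · subst h1
        rw [PySem.List.index?_cons_self]
        simp
      · rw [PySem.List.index?_cons_of_ne ts h1]
        cases hk : PySem.List.index? ts name1 with
        | none => simp
        | some k => simp
    · -- t ≠ name2
      have hl : (match pvInnerA name1 name2 (t :: ts) 0 with
          | (some r, _) => r | (none, _) => name1) =
          (match pvInnerA name1 name2 ts (if t == name1 then 1 else 0) with
          | (some r, _) => r | (none, _) => name1) := by
        simp [pvInnerA, beq_eq_false_iff_ne.mpr h2]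
      rw [hl, PySem.List.index?_cons_of_ne ts h2]
      by_cases h1 : t = name1
      · subst h1
        simp only [beq_self_eq_true, if_true, pvInnerA_one, PySem.List.index?_cons_self]
        cases hk : PySem.List.index? ts name2 with
        | none => simp
        | some k => simp
      · rw [show (if t == name1 then (1:Int) else 0) = 0 from by
          simp [beq_eq_false_iff_ne.mpr h1]]
        rw [ih, PySem.List.index?_cons_of_ne ts h1]
        cases hk2 : PySem.List.index? ts name2 with
        | none => simp
        | some k2 =>
          cases hk1 : PySem.List.index? ts name1 with
          | none =>
            simp only [Option.map_none, Option.getD_none, Option.map_some,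
              List.length_cons]
            by_cases hlt : k2 < ts.length <;> simp [hlt]
          | some k1 =>
            simp only [Option.map_some, Option.getD_some]
            by_cases hlt : k2 < k1 <;> simp [hlt]

-- ===== VERDICT (by name: the statement is the Claim_ definition above) =====
theorem which_name_first_spec : Claim_equal_which_name_first := by
  intro sentence name1 name2 _
  show which_name_first sentence name1 name2 = which_name_first_alt sentence name1 name2
  unfold which_name_first which_name_first_alt
  rw [pvOuterA_flat]
  exact scan_eq_index name1 name2 _
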